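-- pv_equiv track=rewrite | github.com/danielwipert/cas.dam | app/dashboard/server.py | _kpi_summary
-- ===== SOURCE A (Python) =====
-- def _kpi_summary(factlist):
--     counts = {"n_green": 0, "n_yellow": 0, "n_red": 0, "n_info": 0}
--     for f in factlist:
--         s = f["threshold_status"]
--         if s == "green":         counts["n_green"] += 1
--         elif s == "yellow":      counts["n_yellow"] += 1
--         elif s == "red":         counts["n_red"] += 1
--         else:                    counts["n_info"] += 1
--     return counts
-- ===== SOURCE B (Python) =====
-- def _kpi_summary(factlist):
--     # staged passes: extract statuses once, then count each named category with list.count;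
--     # the catch-all info bucket is the remainder
--     statuses = [f["threshold_status"] for f in factlist]
--     g = statuses.count("green")
--     y = statuses.count("yellow")
--     r = statuses.count("red")
--     return {"n_green": g, "n_yellow": y, "n_red": r,
--             "n_info": len(statuses) - g - y - r}
-- ===== Notes on version B (the rewrite author's own statement) =====
-- stated objective: idiomatic
-- what changed: B replaces A's single loop with a four-way conditional by staged passes: it extracts the status list once, counts each named category with list.count, and derives the catch-all n_info bucket by subtraction from the total.
import Mathlib
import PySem

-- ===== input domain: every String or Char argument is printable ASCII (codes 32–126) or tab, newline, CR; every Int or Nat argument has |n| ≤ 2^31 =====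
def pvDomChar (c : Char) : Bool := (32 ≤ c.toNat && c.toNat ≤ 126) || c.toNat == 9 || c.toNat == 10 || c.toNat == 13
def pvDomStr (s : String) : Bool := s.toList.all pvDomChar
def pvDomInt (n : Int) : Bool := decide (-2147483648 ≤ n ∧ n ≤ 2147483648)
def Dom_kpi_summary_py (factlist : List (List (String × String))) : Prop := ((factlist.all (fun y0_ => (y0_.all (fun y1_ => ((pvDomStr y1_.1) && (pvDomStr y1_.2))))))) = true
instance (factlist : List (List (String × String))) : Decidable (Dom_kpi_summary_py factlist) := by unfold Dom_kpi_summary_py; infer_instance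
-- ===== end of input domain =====

-- B extracts the status list once and counts each named category with list.count, deriving n_info by subtraction (same cost, more idiomatic staged passes).


-- ===== PORT A =====
-- one loop step of A: read f["threshold_status"] and bump the matching named counter
def kpiStepA (counts : PySem.Dict String Int) (f : List (String × String)) : PySem.Dict String Int :=
  match (PySem.Dict.mk f).get? "threshold_status" with
  | none => counts   -- Python raises KeyError here; such inputs are excluded by Pre_
  | some s =>
    if s == "green" then counts.modify "n_green" 0 (· + 1)
    else if s == "yellow" then counts.modify "n_yellow" 0 (· + 1)
    else if s == "red" then counts.modify "n_red" 0 (· + 1)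
    else counts.modify "n_info" 0 (· + 1)

def kpi_summary_py (factlist : List (List (String × String))) : List (String × Int) :=
  (factlist.foldl kpiStepA
    (PySem.Dict.mk [("n_green", 0), ("n_yellow", 0), ("n_red", 0), ("n_info", 0)])).items

-- ===== PORT B =====
def kpi_summary_py_alt (factlist : List (List (String × String))) : List (String × Int) :=
  -- the comprehension [f["threshold_status"] for f in factlist]; KeyError (none) is excluded by Pre_
  let statuses := factlist.map (fun f => ((PySem.Dict.mk f).get? "threshold_status").getD "")
  let g : Int := PySem.List.count statuses "green"
  let y : Int := PySem.List.count statuses "yellow"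
  let r : Int := PySem.List.count statuses "red"
  [("n_green", g), ("n_yellow", y), ("n_red", r),
   ("n_info", (statuses.length : Int) - g - y - r)]

-- ===== PRECONDITION & SPEC =====
-- Pre_ excludes exactly the inputs where some fact lacks the "threshold_status" key, on which A raises KeyError.
def Pre_kpi_summary_py (factlist : List (List (String × String))) : Prop :=
  (factlist.all (fun f => (PySem.Dict.mk f).contains "threshold_status")) = true
instance (factlist : List (List (String × String))) : Decidable (Pre_kpi_summary_py factlist) := by unfold Pre_kpi_summary_py; infer_instance
def pvWitness_kpi_summary_py : (List (List (String × String))) :=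
  [[("threshold_status", "green")], [("threshold_status", "note"), ("x", "y")]]

def Spec_kpi_summary_py (factlist : List (List (String × String))) (out : List (String × Int)) : Prop := out = kpi_summary_py_alt factlist
instance (factlist : List (List (String × String))) (out : List (String × Int)) : Decidable (Spec_kpi_summary_py factlist out) := by unfold Spec_kpi_summary_py; infer_instance

-- ===== CLAIM (what is proved, stated in full; the proofs are below) =====
def Claim_equal_kpi_summary_py : Prop := ∀ (factlist : List (List (String × String))), Dom_kpi_summary_py factlist → Pre_kpi_summary_py factlist → Spec_kpi_summary_py factlist (kpi_summary_py factlist)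

-- ===== LEMMAS AND PROOFS =====

-- the status value of each fact (under Pre_ the lookup is always `some`, so the default is never used)
def kpiStat (f : List (String × String)) : String :=
  ((PySem.Dict.mk f).get? "threshold_status").getD ""

-- A's loop, from arbitrary counter values: the items list after the loop, in closed form
lemma kpiA_items (l : List (List (String × String)))
    (h : ∀ f ∈ l, ((PySem.Dict.mk f).get? "threshold_status").isSome) (g y r i : Int) :
    (l.foldl kpiStepA (PySem.Dict.mk [("n_green", g), ("n_yellow", y), ("n_red", r), ("n_info", i)])).items
      = [("n_green", g + ((l.map kpiStat).count "green" : Int)),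
         ("n_yellow", y + ((l.map kpiStat).count "yellow" : Int)),
         ("n_red", r + ((l.map kpiStat).count "red" : Int)),
         ("n_info", i + ((l.length : Int) - ((l.map kpiStat).count "green" : Int)
            - ((l.map kpiStat).count "yellow" : Int) - ((l.map kpiStat).count "red" : Int)))] := by
  induction l generalizing g y r i with
  | nil => simp
  | cons f t ih =>
    obtain ⟨s, hs⟩ := Option.isSome_iff_exists.mp (h f (by simp))
    have hstat : kpiStat f = s := by simp [kpiStat, hs]
    have ih' := fun g y r i => ih (fun g hg => h g (by simp [hg])) g y r i
    have hstep : ∀ d, kpiStepA d f =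
        (if s == "green" then d.modify "n_green" 0 (· + 1)
         else if s == "yellow" then d.modify "n_yellow" 0 (· + 1)
         else if s == "red" then d.modify "n_red" 0 (· + 1)
         else d.modify "n_info" 0 (· + 1)) := by
      intro d; simp only [kpiStepA, hs]
    simp only [List.foldl_cons, List.map_cons, hstat, List.count_cons, List.length_cons, hstep]
    by_cases h1 : s = "green"
    · rw [if_pos (by simp [h1])]
      have hmod : (PySem.Dict.mk [("n_green", g), ("n_yellow", y), ("n_red", r), ("n_info", i)]).modify "n_green" 0 (· + 1)
          = PySem.Dict.mk [("n_green", g + 1), ("n_yellow", y), ("n_red", r), ("n_info", i)] := by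
        simp [PySem.Dict.modify, PySem.Dict.getD, PySem.Dict.get?, PySem.Dict.insert, PySem.Dict.contains]
      rw [hmod, ih']
      simp [h1]
      ring
    · by_cases h2 : s = "yellow"
      · rw [if_neg (by simp [h1]), if_pos (by simp [h2])]
        have hmod : (PySem.Dict.mk [("n_green", g), ("n_yellow", y), ("n_red", r), ("n_info", i)]).modify "n_yellow" 0 (· + 1)
            = PySem.Dict.mk [("n_green", g), ("n_yellow", y + 1), ("n_red", r), ("n_info", i)] := by
          simp [PySem.Dict.modify, PySem.Dict.getD, PySem.Dict.get?, PySem.Dict.insert, PySem.Dict.contains]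
        rw [hmod, ih']
        simp [h2]
        refine ⟨by ring, by ring⟩
      · by_cases h3 : s = "red"
        · rw [if_neg (by simp [h1]), if_neg (by simp [h2]), if_pos (by simp [h3])]
          have hmod : (PySem.Dict.mk [("n_green", g), ("n_yellow", y), ("n_red", r), ("n_info", i)]).modify "n_red" 0 (· + 1)
              = PySem.Dict.mk [("n_green", g), ("n_yellow", y), ("n_red", r + 1), ("n_info", i)] := by
            simp [PySem.Dict.modify, PySem.Dict.getD, PySem.Dict.get?, PySem.Dict.insert, PySem.Dict.contains]
          rw [hmod, ih']
          simp [h3]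
          refine ⟨by ring, by ring⟩
        · rw [if_neg (by simp [h1]), if_neg (by simp [h2]), if_neg (by simp [h3])]
          have hmod : (PySem.Dict.mk [("n_green", g), ("n_yellow", y), ("n_red", r), ("n_info", i)]).modify "n_info" 0 (· + 1)
              = PySem.Dict.mk [("n_green", g), ("n_yellow", y), ("n_red", r), ("n_info", i + 1)] := by
            simp [PySem.Dict.modify, PySem.Dict.getD, PySem.Dict.get?, PySem.Dict.insert, PySem.Dict.contains]
          rw [hmod, ih']
          simp [h1, h2, h3]
          ring

-- ===== VERDICT (by name: the statement is the Claim_ definition above) =====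
theorem kpi_summary_py_spec : Claim_equal_kpi_summary_py := by
  intro l _ hpre
  have h : ∀ f ∈ l, ((PySem.Dict.mk f).get? "threshold_status").isSome := by
    intro f hf
    have := (List.all_eq_true.mp hpre) f hf
    rwa [PySem.Dict.contains_eq_isSome_get?] at this
  show kpi_summary_py l = kpi_summary_py_alt l
  rw [kpi_summary_py, kpi_summary_py_alt]
  have hk : kpiStat = (fun f => ((PySem.Dict.mk f).get? "threshold_status").getD "") := rfl
  simp only [kpiA_items l h, PySem.List.count_eq, hk]
  norm_num
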